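-- pv_equiv track=rewrite | github.com/BryanBradfo/interpolate-triangular-patch | cube3D_subdivised.py | get_adjacent_triangles
-- ===== SOURCE A (Python) =====
-- def get_adjacent_triangles(triangles,pointA, pointB):
--     liste_1_2 = [pointA,pointB]
--     liste_1_8 = []
--     liste_m_1_16 = []
--     for tri in triangles:
--         if pointA in tri and pointB in tri:
--             for point in tri:
--                 if point != pointA and point != pointB:
--                     liste_1_8.append(point)
--     for tri in triangles:
--         if not (pointA in tri and pointB in tri):
--             for point in liste_1_8:
--                 if (point in tri and pointA in tri):
--                     for pointtri in tri:
--                         if pointtri != point and pointtri != pointA: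
--                             liste_m_1_16.append(pointtri)
--                 elif (point in tri and pointB in tri):
--                     for pointtri in tri:
--                         if pointtri != point and pointtri != pointB:
--                             liste_m_1_16.append(pointtri)
--
--     return liste_1_2,liste_1_8,liste_m_1_16
-- ===== SOURCE B (Python) =====
-- def get_adjacent_triangles(triangles, pointA, pointB):
--     # One pass classifies each triangle: collect opposite points of AB-triangles
--     # and the triangles incident to exactly one of A/B (with that anchor); then
--     # only those incident triangles are scanned.
--     opp = []
--     incident = []
--     for tri in triangles:
--         hasA = pointA in tri
--         hasB = pointB in tri
--         if hasA and hasB: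
--             opp.extend(p for p in tri if p != pointA and p != pointB)
--         elif hasA:
--             incident.append((tri, pointA))
--         elif hasB:
--             incident.append((tri, pointB))
--     others = []
--     for tri, anchor in incident:
--         tset = set(tri)
--         for p in opp:
--             if p in tset:
--                 others.extend(q for q in tri if q != p and q != anchor)
--     return [pointA, pointB], opp, others
-- ===== Notes on version B (the rewrite author's own statement) =====
-- stated objective: alternative
-- what changed: Single pass classifies each triangle once (collecting opposite points of AB-triangles and an incident-triangle list with its anchor A or B), then only the incident triangles are scanned with set membership, instead of A's second full scan re-testing every triangle against every collected point.
import Mathlib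
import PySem

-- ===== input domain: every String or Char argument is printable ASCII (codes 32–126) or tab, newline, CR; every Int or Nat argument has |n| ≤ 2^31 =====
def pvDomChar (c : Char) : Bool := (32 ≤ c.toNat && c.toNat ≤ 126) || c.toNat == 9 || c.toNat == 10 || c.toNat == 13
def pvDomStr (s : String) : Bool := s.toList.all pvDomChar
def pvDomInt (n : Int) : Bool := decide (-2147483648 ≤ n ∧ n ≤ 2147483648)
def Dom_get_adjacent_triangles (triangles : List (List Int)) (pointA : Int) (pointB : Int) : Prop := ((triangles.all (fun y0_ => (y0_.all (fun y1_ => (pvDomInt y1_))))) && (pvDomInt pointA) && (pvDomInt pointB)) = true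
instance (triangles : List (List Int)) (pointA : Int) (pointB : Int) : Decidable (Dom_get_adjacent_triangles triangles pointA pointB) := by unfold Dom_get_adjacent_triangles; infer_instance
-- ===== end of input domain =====

-- B replaces A's second full scan over all triangles by a one-pass classification of each
-- triangle (opposite points, or incident-with-anchor), then scans only the incident triangles.

-- ===== PORT A =====
-- 'for pointtri in tri: if pointtri != x and pointtri != y: out.append(pointtri)'
def pvA_collect (tri : List Int) (x y : Int) (acc : List Int) : List Int :=
  tri.foldl (fun a2 q => if q != x && q != y then a2 ++ [q] else a2) acc

-- A's first loop (builds liste_1_8)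
def pvA_opp (triangles : List (List Int)) (pA pB : Int) : List Int :=
  triangles.foldl (fun acc tri =>
    if tri.contains pA && tri.contains pB then pvA_collect tri pA pB acc else acc) []

-- body of A's second loop, for one triangle
def pvA_step2 (l8 : List Int) (pA pB : Int) (acc : List Int) (tri : List Int) : List Int :=
  if !(tri.contains pA && tri.contains pB) then
    l8.foldl (fun a2 p =>
      if tri.contains p && tri.contains pA then pvA_collect tri p pA a2
      else if tri.contains p && tri.contains pB then pvA_collect tri p pB a2
      else a2) acc
  else acc

def get_adjacent_triangles (triangles : List (List Int)) (pointA : Int) (pointB : Int) : List Int × List Int × List Int :=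
  let liste_1_2 := [pointA, pointB]
  let liste_1_8 := pvA_opp triangles pointA pointB
  let liste_m_1_16 := triangles.foldl (pvA_step2 liste_1_8 pointA pointB) []
  (liste_1_2, liste_1_8, liste_m_1_16)

-- ===== PORT B =====
-- B's single classifying pass: (opp, incident triangles with their anchor)
def pvB_scan (triangles : List (List Int)) (pA pB : Int) : List Int × List (List Int × Int) :=
  triangles.foldl (fun st tri =>
    let hasA := tri.contains pA
    let hasB := tri.contains pB
    if hasA && hasB then (st.1 ++ tri.filter (fun p => p != pA && p != pB), st.2)
    else if hasA then (st.1, st.2 ++ [(tri, pA)])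
    else if hasB then (st.1, st.2 ++ [(tri, pB)])
    else st) ([], [])

-- B's second loop, over the incident triangles only
def pvB_others (opp : List Int) (incident : List (List Int × Int)) : List Int :=
  incident.foldl (fun acc pr =>
    let tset : PySem.Set Int := PySem.Set.ofList pr.1
    opp.foldl (fun a2 p =>
      if tset.contains p then a2 ++ pr.1.filter (fun q => q != p && q != pr.2) else a2) acc) []

def get_adjacent_triangles_alt (triangles : List (List Int)) (pointA : Int) (pointB : Int) : List Int × List Int × List Int :=
  let st := pvB_scan triangles pointA pointB
  ([pointA, pointB], st.1, pvB_others st.1 st.2)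

-- ===== PRECONDITION & SPEC =====
def Spec_get_adjacent_triangles (triangles : List (List Int)) (pointA : Int) (pointB : Int) (out : List Int × List Int × List Int) : Prop := out = get_adjacent_triangles_alt triangles pointA pointB
instance (triangles : List (List Int)) (pointA : Int) (pointB : Int) (out : List Int × List Int × List Int) : Decidable (Spec_get_adjacent_triangles triangles pointA pointB out) := by unfold Spec_get_adjacent_triangles; infer_instance

-- ===== CLAIM (what is proved, stated in full; the proofs are below) =====
def Claim_equal_get_adjacent_triangles : Prop := ∀ (triangles : List (List Int)) (pointA : Int) (pointB : Int), Dom_get_adjacent_triangles triangles pointA pointB → Spec_get_adjacent_triangles triangles pointA pointB (get_adjacent_triangles triangles pointA pointB)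

-- ===== LEMMAS AND PROOFS =====

theorem pv_set_contains (t : List Int) (p : Int) :
    (PySem.Set.ofList t).contains p = t.contains p := by
  by_cases h : p ∈ t <;>
    simp [PySem.Set.mem_ofList, h]

theorem pvA_collect_eq (tri : List Int) (x y : Int) (acc : List Int) :
    pvA_collect tri x y acc = acc ++ tri.filter (fun q => q != x && q != y) := by
  unfold pvA_collect
  exact PySem.List.foldl_append_if_eq_filter _ _ _

-- the scan's first component is A's first loop
theorem pv_scan_fst (pA pB : Int) : ∀ (ts : List (List Int)) (st : List Int × List (List Int × Int)),
    (ts.foldl (fun st tri =>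
      let hasA := tri.contains pA
      let hasB := tri.contains pB
      if hasA && hasB then (st.1 ++ tri.filter (fun p => p != pA && p != pB), st.2)
      else if hasA then (st.1, st.2 ++ [(tri, pA)])
      else if hasB then (st.1, st.2 ++ [(tri, pB)])
      else st) st).1
    = ts.foldl (fun acc tri =>
        if tri.contains pA && tri.contains pB then pvA_collect tri pA pB acc else acc) st.1 := by
  intro ts
  induction ts with
  | nil => intro st; rfl
  | cons tri rest ih =>
    intro st
    simp only [List.foldl_cons]
    rw [ih]
    congr 1
    by_cases hA : tri.contains pA = true <;> by_cases hB : tri.contains pB = true <;>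
      simp only [hA, hB, Bool.and_self, Bool.and_true, Bool.and_false,
        if_true, pvA_collect_eq] <;> simp

theorem pvB_scan_fst (triangles : List (List Int)) (pA pB : Int) :
    (pvB_scan triangles pA pB).1 = pvA_opp triangles pA pB := by
  unfold pvB_scan pvA_opp
  exact pv_scan_fst pA pB triangles ([], [])

-- incident triangles of B's scan, as a filterMap (proof-only helper)
def pvIncident (ts : List (List Int)) (pA pB : Int) : List (List Int × Int) :=
  ts.filterMap (fun tri =>
    if tri.contains pA && tri.contains pB then none
    else if tri.contains pA then some (tri, pA)
    else if tri.contains pB then some (tri, pB)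
    else none)

theorem pv_scan_snd (pA pB : Int) : ∀ (ts : List (List Int)) (st : List Int × List (List Int × Int)),
    (ts.foldl (fun st tri =>
      let hasA := tri.contains pA
      let hasB := tri.contains pB
      if hasA && hasB then (st.1 ++ tri.filter (fun p => p != pA && p != pB), st.2)
      else if hasA then (st.1, st.2 ++ [(tri, pA)])
      else if hasB then (st.1, st.2 ++ [(tri, pB)])
      else st) st).2 = st.2 ++ pvIncident ts pA pB := by
  intro ts
  induction ts with
  | nil => intro st; simp [pvIncident]
  | cons tri rest ih =>
    intro st
    simp only [List.foldl_cons]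
    rw [ih]
    by_cases hA : pA ∈ tri <;> by_cases hB : pB ∈ tri <;>
      simp [pvIncident, List.filterMap_cons, hA, hB]

-- one incident triangle with anchor c: A's per-triangle body = B's per-incident body
theorem pv_step2_both (l8 : List Int) (pA pB : Int) (acc tri : List Int)
    (hA : tri.contains pA = true) (hB : tri.contains pB = true) :
    pvA_step2 l8 pA pB acc tri = acc := by
  simp only [pvA_step2, hA, hB, Bool.and_self, Bool.not_true]
  simp

theorem pv_step2_anchorA (l8 : List Int) (pA pB : Int) (acc tri : List Int)
    (hA : tri.contains pA = true) (hB : ¬ tri.contains pB = true) :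
    pvA_step2 l8 pA pB acc tri
      = l8.foldl (fun a2 p => if (PySem.Set.ofList tri).contains p then
          a2 ++ tri.filter (fun q => q != p && q != pA) else a2) acc := by
  simp only [pvA_step2, hA, Bool.eq_false_iff.mpr hB, Bool.and_true,
    Bool.and_false, Bool.not_false, if_true]
  refine PySem.List.foldl_congr_mem _ _ _ _ ?_
  intro a2 p _
  rw [pv_set_contains]
  by_cases hp : tri.contains p = true <;> simp [hp, pvA_collect_eq]

theorem pv_step2_anchorB (l8 : List Int) (pA pB : Int) (acc tri : List Int)
    (hA : ¬ tri.contains pA = true) (hB : tri.contains pB = true) :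
    pvA_step2 l8 pA pB acc tri
      = l8.foldl (fun a2 p => if (PySem.Set.ofList tri).contains p then
          a2 ++ tri.filter (fun q => q != p && q != pB) else a2) acc := by
  simp only [pvA_step2, hB, Bool.eq_false_iff.mpr hA, Bool.and_true, Bool.and_false,
    Bool.not_false, if_true]
  refine PySem.List.foldl_congr_mem _ _ _ _ ?_
  intro a2 p _
  rw [pv_set_contains]
  by_cases hp : tri.contains p = true <;> simp [hp, pvA_collect_eq]

theorem pv_step2_none (l8 : List Int) (pA pB : Int) (acc tri : List Int)
    (hA : ¬ tri.contains pA = true) (hB : ¬ tri.contains pB = true) :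
    pvA_step2 l8 pA pB acc tri = acc := by
  simp only [pvA_step2, Bool.eq_false_iff.mpr hA, Bool.eq_false_iff.mpr hB,
    Bool.and_false, Bool.and_self, Bool.not_false, if_true]
  refine Eq.trans (PySem.List.foldl_congr_mem l8 _ (fun a2 _ => a2) acc ?_)
    (PySem.List.foldl_ignore _ _)
  intro a2 p _
  simp

-- A's second loop over all triangles = B's loop over the incident list
theorem pv_phase2 (l8 : List Int) (pA pB : Int) : ∀ (ts : List (List Int)) (acc : List Int),
    ts.foldl (pvA_step2 l8 pA pB) acc
    = (pvIncident ts pA pB).foldl (fun acc pr =>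
        l8.foldl (fun a2 p =>
          if (PySem.Set.ofList pr.1).contains p then a2 ++ pr.1.filter (fun q => q != p && q != pr.2) else a2) acc) acc := by
  intro ts
  induction ts with
  | nil => intro acc; rfl
  | cons tri rest ih =>
    intro acc
    by_cases hA : tri.contains pA = true <;> by_cases hB : tri.contains pB = true
    · simp only [List.foldl_cons, pv_step2_both l8 pA pB acc tri hA hB, ih,
        pvIncident, List.filterMap_cons, hA, hB, Bool.and_self, if_true]
    · simp only [List.foldl_cons, pv_step2_anchorA l8 pA pB acc tri hA hB, ih]
      have hA' : pA ∈ tri := by simpa using hA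
      have hB' : pB ∉ tri := by simpa using hB
      simp [pvIncident, hA', hB']
    · simp only [List.foldl_cons, pv_step2_anchorB l8 pA pB acc tri hA hB, ih]
      have hA' : pA ∉ tri := by simpa using hA
      have hB' : pB ∈ tri := by simpa using hB
      simp [pvIncident, hA', hB']
    · simp only [List.foldl_cons, pv_step2_none l8 pA pB acc tri hA hB, ih]
      have hA' : pA ∉ tri := by simpa using hA
      have hB' : pB ∉ tri := by simpa using hB
      simp [pvIncident, hA', hB']

-- ===== VERDICT (by name: the statement is the Claim_ definition above) =====
theorem get_adjacent_triangles_spec : Claim_equal_get_adjacent_triangles := by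
  intro triangles pointA pointB _
  unfold Spec_get_adjacent_triangles get_adjacent_triangles get_adjacent_triangles_alt
  have hfst := pvB_scan_fst triangles pointA pointB
  have hsnd : (pvB_scan triangles pointA pointB).2 = pvIncident triangles pointA pointB := by
    have := pv_scan_snd pointA pointB triangles ([], [])
    simpa [pvB_scan] using this
  refine Prod.ext rfl (Prod.ext ?_ ?_)
  · simpa using hfst.symm
  · show List.foldl (pvA_step2 (pvA_opp triangles pointA pointB) pointA pointB) [] triangles
      = pvB_others (pvB_scan triangles pointA pointB).1 (pvB_scan triangles pointA pointB).2
    rw [pvB_others, hfst, hsnd, pv_phase2]
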